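-- pv_equiv track=rewrite | github.com/pangeorg/aoc | python/day-01.py | find_calibration
-- ===== SOURCE A (Python) =====
-- def find_calibration(s: str):
--     n = len(s)
--     first_found = False
--     last_found = False
--     result = 0
--
--     for i in range(n):
--         first = s[i]
--         last = s[n - i - 1]
--         if (not first_found) and first.isdigit():
--             first_found = True
--             result += 10 * int(first)
--         if (not last_found) and last.isdigit():
--             last_found = True
--             result += int(last)
--     return result
-- ===== SOURCE B (Python) =====
-- def find_calibration(s: str):
--     digits = [c for c in s if c.isdigit()]
--     if not digits:
--         return 0
--     return 10 * int(digits[0]) + int(digits[-1])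
-- ===== Notes on version B (the rewrite author's own statement) =====
-- stated objective: simpler
-- what changed: Replaces A's simultaneous two-ended indexed scan with dual found-flags and a running accumulator by a single collect of all digit characters (list comprehension) followed by indexing the first and last element of that list.
import Mathlib
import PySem

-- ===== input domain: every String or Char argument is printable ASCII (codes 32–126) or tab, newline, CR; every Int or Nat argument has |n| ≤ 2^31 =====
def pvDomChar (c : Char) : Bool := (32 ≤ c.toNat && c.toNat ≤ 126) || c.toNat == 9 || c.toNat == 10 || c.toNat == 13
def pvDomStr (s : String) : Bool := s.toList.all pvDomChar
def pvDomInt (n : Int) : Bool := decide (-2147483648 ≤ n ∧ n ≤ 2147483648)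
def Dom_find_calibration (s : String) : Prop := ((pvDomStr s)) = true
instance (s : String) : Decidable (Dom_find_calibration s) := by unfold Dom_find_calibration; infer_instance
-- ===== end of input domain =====

-- B replaces A's two-ended scan with dual found-flags by collecting the digit
-- characters once and indexing the ends of that list (objective: simpler).

-- ===== PORT A =====
-- Transliteration of A: one loop over range(len(s)), reading s[i] and s[n-i-1]
-- (both always in range), two found-flags and a running result.  int(c) on an
-- isdigit-guarded ASCII char is exact as (c.toNat - 48).
def find_calibration (s : String) : Int :=
  let cs := s.toList
  let n : Int := cs.length
  let st := (PySem.List.pyRange 0 n 1).foldl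
    (fun (st : Bool × Bool × Int) i =>
      let first := PySem.List.pyGetD cs i ' '
      let last := PySem.List.pyGetD cs (n - i - 1) ' '
      let st := if !st.1 && PySem.Chars.isdigit first then
                  (true, st.2.1, st.2.2 + 10 * ((first.toNat : Int) - 48))
                else st
      if !st.2.1 && PySem.Chars.isdigit last then
        (st.1, true, st.2.2 + ((last.toNat : Int) - 48))
      else st)
    (false, false, 0)
  st.2.2

-- ===== PORT B =====
-- B: digits = [c for c in s if c.isdigit()]; 0 if empty, else 10*int(digits[0]) + int(digits[-1]).
def find_calibration_alt (s : String) : Int :=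
  let digits := s.toList.filter PySem.Chars.isdigit
  match digits with
  | [] => 0
  | d :: rest =>
      10 * ((d.toNat : Int) - 48) + ((((d :: rest).getLastD ' ').toNat : Int) - 48)

-- ===== PRECONDITION & SPEC =====
def Spec_find_calibration (s : String) (out : Int) : Prop := out = find_calibration_alt s
instance (s : String) (out : Int) : Decidable (Spec_find_calibration s out) := by unfold Spec_find_calibration; infer_instance

-- ===== CLAIM (what is proved, stated in full; the proofs are below) =====
def Claim_equal_find_calibration : Prop := ∀ (s : String), Dom_find_calibration s → Spec_find_calibration s (find_calibration s)

-- ===== LEMMAS AND PROOFS =====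

-- value of the digit char found (0 if none)
def pvDigVal (o : Option Char) : Int :=
  match o with | none => 0 | some c => (c.toNat : Int) - 48

-- one-sided scan step: record the first digit seen, weighted by m
def pvScanStep (m : Int) (st : Bool × Int) (c : Char) : Bool × Int :=
  if !st.1 && PySem.Chars.isdigit c then (true, st.2 + m * ((c.toNat : Int) - 48)) else st

-- the one-sided scan over an index list, and its flag/accumulator components
def pvScanF (m : Int) (g : Int → Char) (L : List Int) (st : Bool × Int) : Bool × Int :=
  L.foldl (fun st i => pvScanStep m st (g i)) st

def pvScanFlag (m : Int) (g : Int → Char) (L : List Int) (b : Bool) : Bool :=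
  (pvScanF m g L (b, 0)).1

def pvScanAcc (m : Int) (g : Int → Char) (L : List Int) (b : Bool) : Int :=
  (pvScanF m g L (b, 0)).2

theorem pvScanF_cons (m : Int) (g : Int → Char) (i : Int) (L : List Int) (st : Bool × Int) :
    pvScanF m g (i :: L) st = pvScanF m g L (pvScanStep m st (g i)) := rfl

theorem pvScanStep_pos (m : Int) (b : Bool) (r : Int) (c : Char)
    (h : (!b && PySem.Chars.isdigit c) = true) :
    pvScanStep m (b, r) c = (true, r + m * ((c.toNat : Int) - 48)) := by
  simp [pvScanStep, h]

theorem pvScanStep_neg (m : Int) (b : Bool) (r : Int) (c : Char)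
    (h : ¬ (!b && PySem.Chars.isdigit c) = true) :
    pvScanStep m (b, r) c = (b, r) := by
  simp [pvScanStep, h]

-- the accumulator is additive in its start value
theorem pvScanF_shift (m : Int) (g : Int → Char) (L : List Int) (b : Bool) (r : Int) :
    pvScanF m g L (b, r) = ((pvScanF m g L (b, 0)).1, r + (pvScanF m g L (b, 0)).2) := by
  induction L generalizing b r with
  | nil => simp [pvScanF]
  | cons i L ih =>
      rw [pvScanF_cons, pvScanF_cons]
      by_cases h : !b && PySem.Chars.isdigit (g i)
      · rw [pvScanStep_pos m b r _ h, pvScanStep_pos m b 0 _ h,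
          ih, ih true (0 + m * ((g i).toNat - 48))]
        refine Prod.ext rfl ?_
        simp; ring
      · rw [pvScanStep_neg m b r _ h, pvScanStep_neg m b 0 _ h, ih]

theorem pvScanF_eta (m : Int) (g : Int → Char) (L : List Int) (b : Bool) (r : Int) :
    pvScanF m g L (b, r) = (pvScanFlag m g L b, r + pvScanAcc m g L b) := by
  rw [pvScanF_shift]; rfl

theorem pvScanFlag_cons (m : Int) (g : Int → Char) (i : Int) (L : List Int) (b : Bool) :
    pvScanFlag m g (i :: L) b = pvScanFlag m g L (pvScanStep m (b, 0) (g i)).1 := by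
  show (pvScanF m g (i :: L) (b, 0)).1 = _
  rw [show pvScanF m g (i :: L) (b, 0) =
      pvScanF m g L ((pvScanStep m (b, 0) (g i)).1, (pvScanStep m (b, 0) (g i)).2) from rfl,
    pvScanF_eta]

theorem pvScanAcc_cons (m : Int) (g : Int → Char) (i : Int) (L : List Int) (b : Bool) :
    pvScanAcc m g (i :: L) b =
      (pvScanStep m (b, 0) (g i)).2 + pvScanAcc m g L (pvScanStep m (b, 0) (g i)).1 := by
  show (pvScanF m g (i :: L) (b, 0)).2 = _
  rw [show pvScanF m g (i :: L) (b, 0) =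
      pvScanF m g L ((pvScanStep m (b, 0) (g i)).1, (pvScanStep m (b, 0) (g i)).2) from rfl,
    pvScanF_eta]

-- the main fold splits into an independent forward scan and backward scan
theorem pvFold_split (cs : List Char) (n : Int) (L : List Int) (st : Bool × Bool × Int) :
    L.foldl
      (fun (st : Bool × Bool × Int) i =>
        let first := PySem.List.pyGetD cs i ' '
        let last := PySem.List.pyGetD cs (n - i - 1) ' '
        let st := if !st.1 && PySem.Chars.isdigit first then
                    (true, st.2.1, st.2.2 + 10 * ((first.toNat : Int) - 48))
                  else st
        if !st.2.1 && PySem.Chars.isdigit last then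
          (st.1, true, st.2.2 + ((last.toNat : Int) - 48))
        else st)
      st =
    (pvScanFlag 10 (fun i => PySem.List.pyGetD cs i ' ') L st.1,
     pvScanFlag 1 (fun i => PySem.List.pyGetD cs (n - i - 1) ' ') L st.2.1,
     st.2.2 + pvScanAcc 10 (fun i => PySem.List.pyGetD cs i ' ') L st.1
            + pvScanAcc 1 (fun i => PySem.List.pyGetD cs (n - i - 1) ' ') L st.2.1) := by
  induction L generalizing st with
  | nil => simp [pvScanFlag, pvScanAcc, pvScanF]
  | cons i L ih =>
      rw [List.foldl_cons, ih, pvScanFlag_cons, pvScanFlag_cons, pvScanAcc_cons, pvScanAcc_cons]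
      by_cases h1 : !st.1 && PySem.Chars.isdigit (PySem.List.pyGetD cs i ' ') <;>
        by_cases h2 : !st.2.1 && PySem.Chars.isdigit (PySem.List.pyGetD cs (n - i - 1) ' ') <;>
          simp only [pvScanStep, h1, h2, if_pos, if_neg, Bool.false_eq_true, not_false_eq_true] <;>
            refine Prod.ext rfl (Prod.ext rfl ?_) <;> simp <;> ring

-- the character-level scan finds the first digit
theorem pvScan_spec (m : Int) (cs : List Char) :
    cs.foldl (pvScanStep m) (false, 0) =
      ((cs.find? PySem.Chars.isdigit).isSome, m * pvDigVal (cs.find? PySem.Chars.isdigit)) := by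
  induction cs with
  | nil => simp [pvDigVal]
  | cons c cs ih =>
      by_cases h : PySem.Chars.isdigit c
      · have htrue : ∀ (r : Int) (l : List Char), l.foldl (pvScanStep m) (true, r) = (true, r) := by
          intro r l
          induction l generalizing r with
          | nil => rfl
          | cons d l ihl => simpa [pvScanStep] using ihl _
        simp [pvScanStep, h, htrue, List.find?, pvDigVal]
      · simpa [pvScanStep, h, List.find?] using ih

-- the backward read cs[n-i-1] is the forward read of cs.reverse
theorem pvGetD_rev (cs : List Char) (i : Int) (h0 : 0 ≤ i) (h1 : i < (cs.length : Int)) :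
    PySem.List.pyGetD cs ((cs.length : Int) - i - 1) ' ' = PySem.List.pyGetD cs.reverse i ' ' := by
  rw [PySem.List.pyGetD_eq_getElem cs ' ' (by omega) (by omega),
    PySem.List.pyGetD_eq_getElem cs.reverse ' ' h0 (by simpa using h1)]
  rw [List.getElem_reverse]
  congr 1
  omega

theorem find_calibration_spec : Claim_equal_find_calibration := by
  intro s _hdom
  unfold Spec_find_calibration
  show find_calibration s = find_calibration_alt s
  have hA : find_calibration s =
      ((PySem.List.pyRange 0 (s.toList.length : Int) 1).foldl
        (fun (st : Bool × Bool × Int) i =>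
          let first := PySem.List.pyGetD s.toList i ' '
          let last := PySem.List.pyGetD s.toList ((s.toList.length : Int) - i - 1) ' '
          let st := if !st.1 && PySem.Chars.isdigit first then
                      (true, st.2.1, st.2.2 + 10 * ((first.toNat : Int) - 48))
                    else st
          if !st.2.1 && PySem.Chars.isdigit last then
            (st.1, true, st.2.2 + ((last.toNat : Int) - 48))
          else st)
        (false, false, 0)).2.2 := rfl
  rw [hA, pvFold_split]
  -- forward scan = scan of the characters
  have hF : pvScanAcc 10 (fun i => PySem.List.pyGetD s.toList i ' ')
      (PySem.List.pyRange 0 (s.toList.length : Int) 1) false =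
      (s.toList.foldl (pvScanStep 10) (false, 0)).2 := by
    show (pvScanF 10 (fun i => PySem.List.pyGetD s.toList i ' ')
      (PySem.List.pyRange 0 (s.toList.length : Int) 1) (false, 0)).2 = _
    unfold pvScanF
    rw [PySem.List.foldl_pyRange_zero_pyGetD' s.toList ' ' (pvScanStep 10) (false, 0)]
  -- backward scan = scan of the reversed characters
  have hB : pvScanAcc 1 (fun i => PySem.List.pyGetD s.toList ((s.toList.length : Int) - i - 1) ' ')
      (PySem.List.pyRange 0 (s.toList.length : Int) 1) false =
      (s.toList.reverse.foldl (pvScanStep 1) (false, 0)).2 := by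
    show (pvScanF 1 (fun i => PySem.List.pyGetD s.toList ((s.toList.length : Int) - i - 1) ' ')
      (PySem.List.pyRange 0 (s.toList.length : Int) 1) (false, 0)).2 = _
    unfold pvScanF
    rw [PySem.List.foldl_congr_mem _ _
      (fun st i => pvScanStep 1 st (PySem.List.pyGetD s.toList.reverse i ' ')) _
      (by
        intro acc x hx
        rw [PySem.List.mem_pyRange_one] at hx
        simp only []
        rw [pvGetD_rev s.toList x hx.1 hx.2])]
    rw [show ((s.toList.length : Int)) = ((s.toList.reverse.length : Int)) by simp,
      PySem.List.foldl_pyRange_zero_pyGetD' s.toList.reverse ' ' (pvScanStep 1) (false, 0)]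
  rw [hF, hB, pvScan_spec, pvScan_spec]
  -- both finds, expressed through the filtered digit list
  rw [show s.toList.find? PySem.Chars.isdigit = (s.toList.filter PySem.Chars.isdigit).head? from
      Eq.symm List.head?_filter,
    show s.toList.reverse.find? PySem.Chars.isdigit =
        (s.toList.filter PySem.Chars.isdigit).getLast? from by
      rw [← List.head?_filter, List.filter_reverse, List.head?_reverse]]
  unfold find_calibration_alt
  cases hd : s.toList.filter PySem.Chars.isdigit with
  | nil => simp [pvDigVal]
  | cons d rest =>
      have hlast : (d :: rest).getLast? = some ((d :: rest).getLastD ' ') := by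
        rw [List.getLastD_eq_getLast?]
        cases h : (d :: rest).getLast? with
        | none => simp at h
        | some x => rfl
      rw [hlast]
      simp [pvDigVal]
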